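-- pv_equiv track=rewrite | github.com/MarieKosDuc/Exercices-individuels-Ada-Tech-School | Suite de Conway - Look and Say/conway.py | decoupe_chaine
-- ===== SOURCE A (Python) =====
-- def decoupe_chaine(string):
--     res_string = string[0]
--     for x in range(1, len(string)):
--         if string[x] == string[x-1]:
--             res_string += string[x]
--         else:
--             res_string += " " + string[x]
--     return res_string
-- ===== SOURCE B (Python) =====
-- def decoupe_chaine(string):
--     runs = []
--     i = 0
--     n = len(string)
--     while i < n:
--         j = i + 1
--         while j < n and string[j] == string[i]:
--             j += 1
--         runs.append(string[i:j])
--         i = j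
--     return " ".join(runs)
-- ===== Notes on version B (the rewrite author's own statement) =====
-- stated objective: idiomatic
-- what changed: B first cuts the string into the list of maximal runs of equal characters with a two-pointer scan and then joins the runs with a single space-separated join, instead of A's incremental scan that compares each position with its predecessor and grows the result by concatenation.
import Mathlib
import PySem

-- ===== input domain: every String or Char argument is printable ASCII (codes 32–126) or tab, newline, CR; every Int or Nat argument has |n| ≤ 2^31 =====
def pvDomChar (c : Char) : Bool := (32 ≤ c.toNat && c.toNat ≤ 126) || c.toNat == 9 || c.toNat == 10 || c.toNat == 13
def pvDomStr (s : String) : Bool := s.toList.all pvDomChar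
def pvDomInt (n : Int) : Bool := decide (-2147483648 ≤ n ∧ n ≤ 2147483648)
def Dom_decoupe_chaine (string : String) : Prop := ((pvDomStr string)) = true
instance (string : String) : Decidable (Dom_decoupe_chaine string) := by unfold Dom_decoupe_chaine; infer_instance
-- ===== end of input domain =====

-- B builds the list of maximal equal-character runs with a two-pointer scan and then joins them with single spaces,
-- instead of A's incremental adjacent-character scan that grows the result by concatenation (idiomatic; not faster).


-- ===== PORT A =====
-- one loop step of A: compare string[x] with string[x-1], append either string[x] or " " + string[x]
def pvStepA (cs : List Char) (res : List Char) (x : Int) : List Char :=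
  if PySem.List.pyGetD cs x ' ' == PySem.List.pyGetD cs (x - 1) ' '
  then res ++ [PySem.List.pyGetD cs x ' ']
  else res ++ [' ', PySem.List.pyGetD cs x ' ']

def decoupe_chaine (string : String) : String :=
  let cs := string.toList
  match PySem.List.pyGet? cs 0 with
  | none => ""   -- Python raises IndexError here (string[0] on ""); excluded by Pre_
  | some c0 =>
      String.ofList ((PySem.List.pyRange 1 (PySem.Str.len string) 1).foldl (pvStepA cs) [c0])

-- ===== PORT B =====
-- inner while-loop: collect the rest of the current run of c, return (run tail, remainder)
def pvTakeRun (c : Char) : List Char → List Char × List Char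
  | [] => ([], [])
  | d :: t =>
      if d == c then
        let p := pvTakeRun c t
        (d :: p.1, p.2)
      else ([], d :: t)

theorem pvTakeRun_snd_le (c : Char) : ∀ (t : List Char), (pvTakeRun c t).2.length ≤ t.length := by
  intro t
  induction t with
  | nil => simp [pvTakeRun]
  | cons d t ih =>
      by_cases h : (d == c) = true
      · simp [pvTakeRun, h]; omega
      · simp [pvTakeRun, h]

-- outer while-loop: the list of maximal runs
def pvRuns : List Char → List (List Char)
  | [] => []
  | c :: t =>
      let p := pvTakeRun c t
      (c :: p.1) :: pvRuns p.2
termination_by t => t.length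
decreasing_by
  have := pvTakeRun_snd_le c t
  simpa using Nat.lt_succ_of_le this

-- " ".join
def pvJoinSp : List (List Char) → List Char
  | [] => []
  | [r] => r
  | r :: rs => r ++ ' ' :: pvJoinSp rs

def decoupe_chaine_alt (string : String) : String :=
  String.ofList (pvJoinSp (pvRuns string.toList))

-- ===== PRECONDITION & SPEC =====
-- Pre_ excludes exactly the empty string, on which A raises IndexError (string[0]).
def Pre_decoupe_chaine (string : String) : Prop := string.toList ≠ []
instance (string : String) : Decidable (Pre_decoupe_chaine string) := by unfold Pre_decoupe_chaine; infer_instance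

def pvWitness_decoupe_chaine : String := "1112223"

def Spec_decoupe_chaine (string : String) (out : String) : Prop := out = decoupe_chaine_alt string
instance (string : String) (out : String) : Decidable (Spec_decoupe_chaine string out) := by unfold Spec_decoupe_chaine; infer_instance

-- ===== CLAIM (what is proved, stated in full; the proofs are below) =====
def Claim_equal_decoupe_chaine : Prop := ∀ (string : String), Dom_decoupe_chaine string → Pre_decoupe_chaine string → Spec_decoupe_chaine string (decoupe_chaine string)

-- ===== LEMMAS AND PROOFS =====

-- reference form both programs are reduced to: the output after the first character,
-- given the previous character p
def pvSpec (p : Char) : List Char → List Char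
  | [] => []
  | d :: t => (if d == p then [d] else [' ', d]) ++ pvSpec d t

-- A's index fold from position k+1 produces pvSpec of the suffix
theorem pvFoldA (cs : List Char) : ∀ (m k : Nat) (acc : List Char), k + 1 + m = cs.length →
    (PySem.List.pyRange ((k : Int) + 1) (cs.length : Int) 1).foldl (pvStepA cs) acc
      = acc ++ pvSpec (cs.getD k ' ') (cs.drop (k + 1)) := by
  intro m
  induction m with
  | zero =>
      intro k acc h
      rw [PySem.List.pyRange_one_eq_nil (by omega)]
      rw [List.drop_of_length_le (by omega)]
      simp [pvSpec]
  | succ m ih =>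
      intro k acc h
      have hk1 : k + 1 < cs.length := by omega
      rw [PySem.List.pyRange_one_cons (by exact_mod_cast (by omega : (k : Int) + 1 < (cs.length : Int)))]
      have hcast : ((k : Int) + 1) + 1 = ((k + 1 : Nat) : Int) + 1 := by push_cast; ring
      rw [List.foldl_cons, hcast, ih (k + 1) _ (by omega)]
      have hdrop : cs.drop (k + 1) = cs[k + 1] :: cs.drop (k + 2) := by
        rw [List.drop_eq_getElem_cons hk1]
      have hstep : pvStepA cs acc ((k : Int) + 1)
          = acc ++ (if cs[k + 1] == cs.getD k ' ' then [cs[k + 1]] else [' ', cs[k + 1]]) := by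
        have h1 : ((k : Int) + 1) = ((k + 1 : Nat) : Int) := by push_cast; ring
        have h2 : ((k + 1 : Nat) : Int) - 1 = ((k : Nat) : Int) := by push_cast; ring
        simp only [pvStepA, h1, h2, PySem.List.pyGetD_natCast]
        rw [List.getD_eq_getElem cs ' ' hk1]
        split <;> rfl
      rw [hstep, hdrop]
      simp only [pvSpec]
      rw [List.getD_eq_getElem cs ' ' hk1]
      simp [List.append_assoc]

-- B's run splitter versus pvSpec: the current run's tail, then a space-separated boundary
theorem pvTakeRun_spec (c : Char) : ∀ (t : List Char),
    pvSpec c t = (pvTakeRun c t).1 ++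
      (match (pvTakeRun c t).2 with
       | [] => []
       | e :: t2 => ' ' :: e :: pvSpec e t2) := by
  intro t
  induction t generalizing c with
  | nil => simp [pvSpec, pvTakeRun]
  | cons d t ih =>
      by_cases h : (d == c) = true
      · have hd : d = c := by exact eq_of_beq h
        simp only [pvSpec, pvTakeRun, h, if_pos]
        subst hd
        rw [ih d]
        simp
      · simp [pvSpec, pvTakeRun, h]

theorem pvJoinRuns : ∀ (n : Nat) (t : List Char), t.length ≤ n → ∀ (c : Char),
    pvJoinSp (pvRuns (c :: t)) = c :: pvSpec c t := by
  intro n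
  induction n with
  | zero =>
      intro t ht c
      have : t = [] := by cases t <;> simp_all
      subst this
      simp [pvRuns, pvTakeRun, pvJoinSp, pvSpec]
  | succ n ih =>
      intro t ht c
      rw [pvRuns]
      rw [pvTakeRun_spec c t]
      have hle := pvTakeRun_snd_le c t
      cases hrest : (pvTakeRun c t).2 with
      | nil => simp [pvJoinSp, pvRuns]
      | cons e t2 =>
          rw [pvRuns]
          have h2 : t2.length ≤ n := by
            rw [hrest] at hle
            simp at hle
            omega
          have := ih ((pvTakeRun e t2).1 ++ (pvTakeRun e t2).2)
          show pvJoinSp ((c :: (pvTakeRun c t).1) :: (e :: (pvTakeRun e t2).1) :: pvRuns (pvTakeRun e t2).2)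
              = c :: ((pvTakeRun c t).1 ++ ' ' :: e :: pvSpec e t2)
          have hinner : pvJoinSp ((e :: (pvTakeRun e t2).1) :: pvRuns (pvTakeRun e t2).2)
              = e :: pvSpec e t2 := by
            rw [← pvRuns]
            exact ih t2 h2 e
          cases hx : pvRuns (pvTakeRun e t2).2 with
          | nil =>
              rw [hx] at hinner
              simp only [pvJoinSp] at hinner ⊢
              simp [hinner]
          | cons r rs =>
              rw [hx] at hinner
              simp only [pvJoinSp] at hinner ⊢
              simp [← hinner]

-- ===== VERDICT (by name: the statement is the Claim_ definition above) =====
theorem decoupe_chaine_spec : Claim_equal_decoupe_chaine := by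
  intro s _ hpre
  unfold Spec_decoupe_chaine decoupe_chaine decoupe_chaine_alt
  cases hcs : s.toList with
  | nil => exact absurd hcs hpre
  | cons c0 rest =>
      have hlen : PySem.Str.len s = ((c0 :: rest).length : Int) := by
        rw [PySem.Str.len_eq, hcs]
      simp only [hlen, PySem.List.pyGet?_zero_cons]
      have hA := pvFoldA (c0 :: rest) rest.length 0 [c0] (by simp [Nat.add_comm])
      simp only [Nat.cast_zero, zero_add] at hA
      rw [hA, pvJoinRuns rest.length rest le_rfl c0]
      rfl
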